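-- pv_equiv track=rewrite | github.com/brkdnmz/inzvaland | Do The Math/#9/writing-down-the-journey-of-life-ii/sol.py | solve
-- ===== SOURCE A (Python) =====
-- from math import gcd
--
-- def solve(n: int, lines: "list[int]"):
--     overall_gcd = n + 1
--     for line in lines:
--         overall_gcd = gcd(overall_gcd, line)
--     ans = -1  # exclude divisor = overall_gcd
--     for i in range(1, overall_gcd + 1):
--         if i * i > overall_gcd:
--             break
--         if overall_gcd % i:
--             continue
--         ans += 1 + (i * i != overall_gcd)
--     return ans
-- ===== SOURCE B (Python) =====
-- from math import gcd
--
-- def solve(n: int, lines: "list[int]"):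
--     g = n + 1
--     for line in lines:
--         g = gcd(g, line)
--     # count divisors of g via prime factorization: d(g) = prod (e_i + 1)
--     count = 1
--     d = 2
--     while d * d <= g:
--         if g % d == 0:
--             e = 0
--             while g % d == 0:
--                 g //= d
--                 e += 1
--             count *= e + 1
--         d += 1
--     if g > 1:
--         count *= 2
--     return count - 1
-- ===== Notes on version B (the rewrite author's own statement) =====
-- stated objective: alternative
-- what changed: Replaces A's paired trial-division enumeration of divisors up to sqrt(g) (counting i and g/i per hit) with a prime-factorization loop that strips each prime power and multiplies the (exponent+1) factors, then subtracts 1.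
-- outside the precondition, e.g. on solve(-5, []): A returns -1, B returns 0; on solve(-1, [0]): A returns -1, B returns 0
import Mathlib
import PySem

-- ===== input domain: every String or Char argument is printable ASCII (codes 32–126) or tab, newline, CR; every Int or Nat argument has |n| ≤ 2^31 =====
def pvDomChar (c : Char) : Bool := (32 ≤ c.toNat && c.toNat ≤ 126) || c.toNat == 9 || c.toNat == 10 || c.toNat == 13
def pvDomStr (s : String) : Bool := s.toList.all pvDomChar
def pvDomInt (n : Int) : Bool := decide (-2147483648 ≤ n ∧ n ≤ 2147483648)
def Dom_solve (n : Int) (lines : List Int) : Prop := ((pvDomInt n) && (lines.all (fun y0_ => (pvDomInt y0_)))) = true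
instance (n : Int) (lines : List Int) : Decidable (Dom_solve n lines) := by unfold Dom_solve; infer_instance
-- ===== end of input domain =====

-- B replaces A's paired √g trial-division divisor count with a prime-factorization loop multiplying (exponent+1); alternative algorithm of similar cost.


-- ===== PORT A =====
-- math.gcd: nonnegative gcd of the absolute values
def pyGcd (a b : Int) : Int := (Int.gcd a b : Int)

-- termination facts, named so the loop bodies stay small
theorem decAuxA (g i : Int) (h : i ≤ g) : (g + 1 - (i + 1)).toNat < (g + 1 - i).toNat := by
  omega

-- A's divisor loop: for i in range(1, g+1): if i*i > g: break; if g % i: continue; ans += 1 + (i*i != g)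
def solveLoopA (g i ans : Int) : Int :=
  if _h : i ≤ g then
    if g < i * i then ans
    else solveLoopA g (i + 1)
      (if PySem.Int.mod g i ≠ 0 then ans
       else ans + 1 + (if i * i ≠ g then 1 else 0))
  else ans
termination_by (g + 1 - i).toNat
decreasing_by exact decAuxA g i _h

def solve (n : Int) (lines : List Int) : Int :=
  solveLoopA (lines.foldl (fun a l => pyGcd a l) (n + 1)) 1 (-1)

-- ===== PORT B =====
theorem stripLoopDec (g d : Int) (hd : 1 < d) (hg : 0 < g) :
    (PySem.Int.floordiv g d).toNat < g.toNat := by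
  have h1 : PySem.Int.floordiv g d = g / d := PySem.Int.floordiv_eq_ediv_of_pos (by omega)
  have h2 : g / d < g := Int.ediv_lt_of_lt_mul (by omega) (by nlinarith)
  have h3 : 0 ≤ g / d := Int.ediv_nonneg (by omega) (by omega)
  omega

-- inner while of Source B: while g % d == 0: g //= d; e += 1  (the 1 < d ∧ 0 < g guard only makes the recursion total; it holds at every reachable call)
def stripLoop (g d e : Int) : Int × Int :=
  if h : 1 < d ∧ 0 < g ∧ PySem.Int.mod g d = 0 then
    stripLoop (PySem.Int.floordiv g d) d (e + 1)
  else (g, e)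
termination_by g.toNat
decreasing_by exact stripLoopDec g d h.1 h.2.1

-- needed for factorLoop's termination: the stripped value never grows, and strictly shrinks when the loop runs
theorem stripLoop_fst_le (g d e : Int) : (stripLoop g d e).1 ≤ g := by
  induction g, e using stripLoop.induct d with
  | case1 g e h ih =>
    rw [stripLoop, dif_pos h]
    have h1 : PySem.Int.floordiv g d = g / d := PySem.Int.floordiv_eq_ediv_of_pos (by omega)
    have h2 : g / d < g := Int.ediv_lt_of_lt_mul (by omega) (by nlinarith [h.1, h.2.1])
    omega
  | case2 g e h => rw [stripLoop, dif_neg h]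

theorem stripLoop_fst_lt (g d e : Int) (hd : 1 < d) (hg : 0 < g)
    (hm : PySem.Int.mod g d = 0) : (stripLoop g d e).1 < g := by
  rw [stripLoop, dif_pos ⟨hd, hg, hm⟩]
  have h1 : PySem.Int.floordiv g d = g / d := PySem.Int.floordiv_eq_ediv_of_pos (by omega)
  have h2 : g / d < g := Int.ediv_lt_of_lt_mul (by omega) (by nlinarith)
  have h3 := stripLoop_fst_le (PySem.Int.floordiv g d) d (e + 1)
  omega

theorem facDec1 (g d : Int) (hd : 1 < d) (hdd : d * d ≤ g) (hm : PySem.Int.mod g d = 0) :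
    (2 * (stripLoop g d 0).1 - (d + 1)).toNat < (2 * g - d).toNat := by
  have h2 : 2 * d ≤ d * d := by nlinarith
  have h3 := stripLoop_fst_lt g d 0 hd (by nlinarith) hm
  omega

theorem facDec2 (g d : Int) (hd : 1 < d) (hdd : d * d ≤ g) :
    (2 * g - (d + 1)).toNat < (2 * g - d).toNat := by
  have h2 : 2 * d ≤ d * d := by nlinarith
  omega

-- outer while of Source B: while d*d <= g: …; returns (final g, count)  (1 < d is the same totality guard)
def factorLoop (g d count : Int) : Int × Int :=
  if h : 1 < d ∧ d * d ≤ g then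
    if hm : PySem.Int.mod g d = 0 then
      factorLoop (stripLoop g d 0).1 (d + 1) (count * ((stripLoop g d 0).2 + 1))
    else factorLoop g (d + 1) count
  else (g, count)
termination_by (2 * g - d).toNat
decreasing_by
  · exact facDec1 g d h.1 h.2 hm
  · exact facDec2 g d h.1 h.2

def solve_alt (n : Int) (lines : List Int) : Int :=
  let g := lines.foldl (fun a l => pyGcd a l) (n + 1)
  let p := factorLoop g 2 1
  (if 1 < p.1 then p.2 * 2 else p.2) - 1

-- ===== PRECONDITION & SPEC =====
-- Pre_ excludes inputs whose accumulated gcd is not positive — empty lines with n + 1 ≤ 0, or n = -1 with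
-- all-zero lines — a degenerate corner ("divisors of a nonpositive number") no one would specify: A's empty
-- loop returns -1 there while B's empty factorization returns 0, both mere artefacts.
def Pre_solve (n : Int) (lines : List Int) : Prop :=
  ¬ ((lines = [] ∧ n + 1 ≤ 0) ∨ (n = -1 ∧ ∀ l ∈ lines, l = 0))
instance (n : Int) (lines : List Int) : Decidable (Pre_solve n lines) := by unfold Pre_solve; infer_instance

def pvWitness_solve : Int × List Int := (5, [3])

def Spec_solve (n : Int) (lines : List Int) (out : Int) : Prop := out = solve_alt n lines
instance (n : Int) (lines : List Int) (out : Int) : Decidable (Spec_solve n lines out) := by unfold Spec_solve; infer_instance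

-- ===== CLAIM (what is proved, stated in full; the proofs are below) =====
def Claim_equal_solve : Prop := ∀ (n : Int) (lines : List Int), Dom_solve n lines → Pre_solve n lines → Spec_solve n lines (solve n lines)

-- ===== LEMMAS AND PROOFS =====

-- Nat shadows of the two loops (the bridges below identify them with the Int ports on nonnegative inputs)
def loopA (g i : Nat) (ans : Int) : Int :=
  if i ≤ g then
    if g < i * i then ans
    else loopA g (i + 1)
      (if g % i ≠ 0 then ans else ans + 1 + (if i * i ≠ g then 1 else 0))
  else ans
termination_by g + 1 - i

def stripN (g d e : Nat) : Nat × Nat :=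
  if h : 1 < d ∧ 0 < g ∧ g % d = 0 then stripN (g / d) d (e + 1) else (g, e)
termination_by g
decreasing_by exact Nat.div_lt_self h.2.1 h.1

theorem stripN_fst_le (g d e : Nat) : (stripN g d e).1 ≤ g := by
  induction g, e using stripN.induct d with
  | case1 g e h ih =>
    rw [stripN, dif_pos h]
    have := Nat.div_lt_self h.2.1 h.1
    omega
  | case2 g e h => rw [stripN, dif_neg h]

theorem stripN_fst_lt (g d e : Nat) (hd : 1 < d) (hg : 0 < g) (hm : g % d = 0) :
    (stripN g d e).1 < g := by
  rw [stripN, dif_pos ⟨hd, hg, hm⟩]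
  have h1 := stripN_fst_le (g / d) d (e + 1)
  have h2 := Nat.div_lt_self hg hd
  omega

def factorN (g d : Nat) (count : Int) : Nat × Int :=
  if h : 1 < d ∧ d * d ≤ g then
    if hm : g % d = 0 then
      factorN (stripN g d 0).1 (d + 1) (count * ((stripN g d 0).2 + 1))
    else factorN g (d + 1) count
  else (g, count)
termination_by 2 * g - d
decreasing_by
  · have h2 : 2 * d ≤ d * d := by nlinarith [h.1]
    have h3 := stripN_fst_lt g d 0 h.1 (by nlinarith [h.1]) hm
    omega
  · have h2 : 2 * d ≤ d * d := by nlinarith [h.1]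
    omega

-- bridges
theorem solveLoopA_natCast (g i : Nat) (ans : Int) :
    solveLoopA (g : Int) (i : Int) ans = loopA g i ans := by
  rw [solveLoopA, loopA]
  by_cases h1 : i ≤ g
  · have h1' : (i : Int) ≤ (g : Int) := by exact_mod_cast h1
    rw [dif_pos h1', if_pos h1]
    by_cases h2 : g < i * i
    · have h2' : (g : Int) < (i : Int) * (i : Int) := by exact_mod_cast h2
      rw [if_pos h2', if_pos h2]
    · have h2' : ¬ ((g : Int) < (i : Int) * (i : Int)) := by
        intro hc; exact h2 (by exact_mod_cast hc)
      rw [if_neg h2', if_neg h2]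
      have hcast : ((i : Int) + 1) = ((i + 1 : Nat) : Int) := by push_cast; ring
      rw [hcast, solveLoopA_natCast g (i + 1)]
      congr 1
      have hmod : PySem.Int.mod (g : Int) (i : Int) = ((g % i : Nat) : Int) :=
        PySem.Int.mod_natCast g i
      rw [hmod]
      simp only [ne_eq, Nat.cast_eq_zero, ← Nat.cast_mul, Nat.cast_inj]
  · have h1' : ¬ ((i : Int) ≤ (g : Int)) := by intro hc; exact h1 (by exact_mod_cast hc)
    rw [dif_neg h1', if_neg h1]
termination_by g + 1 - i

theorem stripLoop_natCast (g d e : Nat) :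
    stripLoop (g : Int) (d : Int) (e : Int) = (((stripN g d e).1 : Int), ((stripN g d e).2 : Int)) := by
  rw [stripLoop, stripN]
  by_cases h : 1 < d ∧ 0 < g ∧ g % d = 0
  · have h' : 1 < (d : Int) ∧ 0 < (g : Int) ∧ PySem.Int.mod (g : Int) (d : Int) = 0 := by
      refine ⟨by exact_mod_cast h.1, by exact_mod_cast h.2.1, ?_⟩
      rw [PySem.Int.mod_natCast]; exact_mod_cast h.2.2
    rw [dif_pos h', dif_pos h]
    have hfd : PySem.Int.floordiv (g : Int) (d : Int) = ((g / d : Nat) : Int) :=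
      PySem.Int.floordiv_natCast g d
    have hce : ((e : Int) + 1) = ((e + 1 : Nat) : Int) := by push_cast; ring
    rw [hfd, hce, stripLoop_natCast (g / d) d (e + 1)]
  · have h' : ¬ (1 < (d : Int) ∧ 0 < (g : Int) ∧ PySem.Int.mod (g : Int) (d : Int) = 0) := by
      intro hc
      refine h ⟨by exact_mod_cast hc.1, by exact_mod_cast hc.2.1, ?_⟩
      have := hc.2.2
      rw [PySem.Int.mod_natCast] at this
      exact_mod_cast this
    rw [dif_neg h', dif_neg h]
termination_by g
decreasing_by exact Nat.div_lt_self h.2.1 h.1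

theorem factorLoop_natCast (g d : Nat) (count : Int) :
    factorLoop (g : Int) (d : Int) count = (((factorN g d count).1 : Int), (factorN g d count).2) := by
  rw [factorLoop, factorN]
  by_cases h : 1 < d ∧ d * d ≤ g
  · have h' : 1 < (d : Int) ∧ (d : Int) * (d : Int) ≤ (g : Int) := by
      exact ⟨by exact_mod_cast h.1, by exact_mod_cast h.2⟩
    rw [dif_pos h', dif_pos h]
    by_cases hm : g % d = 0
    · have hm' : PySem.Int.mod (g : Int) (d : Int) = 0 := by
        rw [PySem.Int.mod_natCast]; exact_mod_cast hm
      rw [dif_pos hm', dif_pos hm]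
      have hz : ((0 : Nat) : Int) = (0 : Int) := rfl
      have hs := stripLoop_natCast g d 0
      rw [show (0 : Int) = ((0 : Nat) : Int) from rfl, hs]
      have hd1 : ((d : Int) + 1) = ((d + 1 : Nat) : Int) := by push_cast; ring
      have hc1 : (((stripN g d 0).2 : Int) + 1) = (((stripN g d 0).2 : Nat) : Int) + 1 := rfl
      rw [hd1, factorLoop_natCast (stripN g d 0).1 (d + 1) (count * (((stripN g d 0).2 : Int) + 1))]
    · have hm' : ¬ PySem.Int.mod (g : Int) (d : Int) = 0 := by
        intro hc; rw [PySem.Int.mod_natCast] at hc; exact hm (by exact_mod_cast hc)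
      rw [dif_neg hm', dif_neg hm]
      have hd1 : ((d : Int) + 1) = ((d + 1 : Nat) : Int) := by push_cast; ring
      rw [hd1, factorLoop_natCast g (d + 1) count]
  · have h' : ¬ (1 < (d : Int) ∧ (d : Int) * (d : Int) ≤ (g : Int)) := by
      intro hc; exact h ⟨by exact_mod_cast hc.1, by exact_mod_cast hc.2⟩
    rw [dif_neg h', dif_neg h]
termination_by 2 * g - d
decreasing_by
  · have h2 : 2 * d ≤ d * d := by nlinarith [h.1]
    have h3 := stripN_fst_lt g d 0 h.1 (by nlinarith [h.1]) hm
    omega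
  · have h2 : 2 * d ≤ d * d := by nlinarith [h.1]
    omega

-- A-side characterization
theorem loopA_inv (g : Nat) (hg : 0 < g) (i : Nat) (hi : 1 ≤ i) (ans : Int) :
    loopA g i ans = ans + ((g.divisors.filter (fun j => i ≤ j ∧ j * j ≤ g)).sum
      (fun j => if j * j = g then (1 : Int) else 2)) := by
  induction i, ans using loopA.induct g with
  | case1 i ans h1 h2 =>
    -- i ≤ g, g < i*i: loop stops; no divisor j ≥ i has j*j ≤ g
    rw [loopA, if_pos h1, if_pos h2]
    have hempty : g.divisors.filter (fun j => i ≤ j ∧ j * j ≤ g) = ∅ := by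
      rw [Finset.filter_eq_empty_iff]
      rintro j hj ⟨hij, hjj⟩
      nlinarith [hij, hjj, h2]
    rw [hempty, Finset.sum_empty, add_zero]
  | case2 i ans h1 h2 ih =>
    rw [loopA, if_pos h1, if_neg h2]
    simp only [dite_eq_ite] at ih
    rw [ih (by omega)]
    have hsq : i * i ≤ g := by omega
    by_cases hdvd : g % i = 0
    · have hidvd : i ∣ g := Nat.dvd_of_mod_eq_zero hdvd
      have hsplit : g.divisors.filter (fun j => i ≤ j ∧ j * j ≤ g)
          = insert i (g.divisors.filter (fun j => i + 1 ≤ j ∧ j * j ≤ g)) := by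
        ext j
        simp only [Finset.mem_filter, Finset.mem_insert, Nat.mem_divisors]
        constructor
        · rintro ⟨hjd, hij, hjj⟩
          rcases eq_or_lt_of_le hij with h | h
          · exact Or.inl h.symm
          · exact Or.inr ⟨hjd, by omega, hjj⟩
        · rintro (rfl | ⟨hjd, hij, hjj⟩)
          · exact ⟨⟨hidvd, by omega⟩, le_rfl, hsq⟩
          · exact ⟨hjd, by omega, hjj⟩
      rw [hsplit, Finset.sum_insert (by simp)]
      simp only [hdvd, ne_eq, not_true_eq_false, if_false]
      by_cases h4 : i * i = g
      · rw [if_pos h4, if_neg (by simpa using h4)]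
        ring
      · rw [if_neg h4, if_pos (by simpa using h4)]
        ring
    · have hsame : g.divisors.filter (fun j => i ≤ j ∧ j * j ≤ g)
          = g.divisors.filter (fun j => i + 1 ≤ j ∧ j * j ≤ g) := by
        ext j
        simp only [Finset.mem_filter, Nat.mem_divisors]
        constructor
        · rintro ⟨hjd, hij, hjj⟩
          have : j ≠ i := fun hji => hdvd (Nat.dvd_iff_mod_eq_zero.mp (hji ▸ hjd.1))
          exact ⟨hjd, by omega, hjj⟩
        · rintro ⟨hjd, hij, hjj⟩
          exact ⟨hjd, by omega, hjj⟩
      rw [hsame]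
      simp only [hdvd, ne_eq, not_false_eq_true, if_true]
  | case3 i ans h1 =>
    -- i > g: divisors are ≤ g < i
    rw [loopA, if_neg h1]
    have hempty : g.divisors.filter (fun j => i ≤ j ∧ j * j ≤ g) = ∅ := by
      rw [Finset.filter_eq_empty_iff]
      rintro j hj ⟨hij, hjj⟩
      have := Nat.le_of_dvd hg (Nat.mem_divisors.mp hj).1
      omega
    rw [hempty, Finset.sum_empty, add_zero]

theorem pairing (g : Nat) (hg : 0 < g) :
    ((g.divisors.filter (fun j => 1 ≤ j ∧ j * j ≤ g)).sum
      (fun j => if j * j = g then (1 : Int) else 2)) = (g.divisors.card : Int) := by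
  -- drop the redundant 1 ≤ j (every divisor of g > 0 is positive)
  have hdrop : g.divisors.filter (fun j => 1 ≤ j ∧ j * j ≤ g)
      = g.divisors.filter (fun j => j * j ≤ g) := by
    apply Finset.filter_congr
    intro j hj
    have hj1 : 1 ≤ j := Nat.pos_of_mem_divisors hj
    simp [hj1]
  rw [hdrop]
  set S := g.divisors.filter (fun j => j * j ≤ g) with hS
  set L := g.divisors.filter (fun j => ¬ j * j ≤ g) with hL
  set S' := g.divisors.filter (fun j => j * j < g) with hS'
  set Q := g.divisors.filter (fun j => j * j = g) with hQ
  -- the sum is 2·|S| − |Q|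
  have hsum : S.sum (fun j => if j * j = g then (1 : Int) else 2)
      = 2 * (S.card : Int) - ((S.filter (fun j => j * j = g)).card : Int) := by
    have : ∀ j ∈ S, (if j * j = g then (1 : Int) else 2)
        = 2 - (if j * j = g then (1 : Int) else 0) := by
      intro j _; by_cases h : j * j = g <;> simp [h]
    rw [Finset.sum_congr rfl this, Finset.sum_sub_distrib, Finset.sum_const,
        Finset.sum_boole]
    ring
  have hSQ : S.filter (fun j => j * j = g) = Q := by
    rw [hS, hQ, Finset.filter_filter]
    apply Finset.filter_congr
    intro j _
    constructor
    · rintro ⟨_, h⟩; simpa using h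
    · intro h; simp at h; omega
  -- |S| = |S'| + |Q|
  have hScard : S.card = S'.card + Q.card := by
    have h1 : S' = S.filter (fun j => j * j < g) := by
      rw [hS, hS', Finset.filter_filter]
      apply Finset.filter_congr
      intro j _
      constructor
      · intro h; simp at h ⊢; omega
      · rintro ⟨_, h⟩; simpa using h
    have h2 : Q = S.filter (fun j => ¬ j * j < g) := by
      rw [hS, hQ, Finset.filter_filter]
      apply Finset.filter_congr
      intro j _
      constructor
      · intro h; simp at h ⊢; omega
      · rintro ⟨h1', h2'⟩; simp at h1' h2' ⊢; omega
    rw [h1, h2]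
    exact (Finset.card_filter_add_card_filter_not _).symm
  -- |divisors| = |S| + |L|
  have hDcard : g.divisors.card = S.card + L.card :=
    (Finset.card_filter_add_card_filter_not _).symm
  -- the pairing j ↦ g / j matches S' with L
  have hbij : S'.card = L.card := by
    apply Finset.card_nbij' (i := fun j => g / j) (j := fun j => g / j)
    · intro j hj
      simp only [hS', Finset.mem_coe, Finset.mem_filter, Nat.mem_divisors] at hj
      obtain ⟨⟨hdvd, _⟩, hlt⟩ := hj
      have hjpos : 0 < j := Nat.pos_of_dvd_of_pos hdvd hg
      have hqdvd : g / j ∣ g := Nat.div_dvd_of_dvd hdvd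
      have hmul : g / j * j = g := Nat.div_mul_cancel hdvd
      have hjlt : j < g / j := by nlinarith [hmul, hlt]
      simp only [hL, Finset.mem_coe, Finset.mem_filter, Nat.mem_divisors]
      refine ⟨⟨hqdvd, by omega⟩, ?_⟩
      nlinarith [hmul, hjlt, hjpos]
    · intro j hj
      simp only [hL, Finset.mem_coe, Finset.mem_filter, Nat.mem_divisors] at hj
      obtain ⟨⟨hdvd, _⟩, hgt⟩ := hj
      have hjpos : 0 < j := Nat.pos_of_dvd_of_pos hdvd hg
      have hqdvd : g / j ∣ g := Nat.div_dvd_of_dvd hdvd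
      have hmul : g / j * j = g := Nat.div_mul_cancel hdvd
      have hqpos : 0 < g / j := Nat.div_pos (Nat.le_of_dvd hg hdvd) hjpos
      have hqlt : g / j < j := by nlinarith [hmul, hgt]
      simp only [hS', Finset.mem_coe, Finset.mem_filter, Nat.mem_divisors]
      refine ⟨⟨hqdvd, by omega⟩, ?_⟩
      nlinarith [hmul, hqlt, hqpos]
    · intro j hj
      simp only [hS', Finset.mem_coe, Finset.mem_filter, Nat.mem_divisors] at hj
      exact Nat.div_div_self hj.1.1 (by omega)
    · intro j hj
      simp only [hL, Finset.mem_coe, Finset.mem_filter, Nat.mem_divisors] at hj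
      exact Nat.div_div_self hj.1.1 (by omega)
  rw [hsum, hSQ]
  have : g.divisors.card = S'.card + S'.card + Q.card := by omega
  rw [this]
  have : S.card = S'.card + Q.card := hScard
  push_cast [this]
  ring

-- B-side characterization
theorem stripN_spec (d : Nat) (hd : 1 < d) (g e : Nat) (hg : 0 < g) :
    ∃ k, stripN g d e = (g / d ^ k, e + k) ∧ d ^ k ∣ g ∧ ¬ d ∣ g / d ^ k := by
  induction g, e using stripN.induct d with
  | case1 g e h ih =>
    have hgd : 0 < g / d := Nat.div_pos (Nat.le_of_dvd h.2.1 (Nat.dvd_of_mod_eq_zero h.2.2)) (by omega)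
    obtain ⟨k', heq, hdvd', hnd⟩ := ih hgd
    refine ⟨k' + 1, ?_, ?_, ?_⟩
    · rw [stripN, dif_pos h, heq]
      congr 1
      · rw [Nat.div_div_eq_div_mul, ← pow_succ']
      · omega
    · rw [pow_succ']
      exact (Nat.dvd_div_iff_mul_dvd (Nat.dvd_of_mod_eq_zero h.2.2)).mp hdvd'
    · rw [pow_succ', ← Nat.div_div_eq_div_mul]
      exact hnd
  | case2 g e h =>
    refine ⟨0, ?_, ?_, ?_⟩
    · rw [stripN, dif_neg h]; simp
    · simp
    · simp only [pow_zero, Nat.div_one]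
      intro hdvd
      exact h ⟨hd, hg, Nat.dvd_iff_mod_eq_zero.mp hdvd⟩

theorem factorN_spec (g d : Nat) (count : Int) (hg : 0 < g) (hd : 1 < d)
    (hmin : ∀ p, p.Prime → p ∣ g → d ≤ p) :
    (if 1 < (factorN g d count).1 then (factorN g d count).2 * 2 else (factorN g d count).2)
      = count * (g.divisors.card : Int) := by
  induction g, d, count using factorN.induct with
  | case1 g d count h hm ih =>
    -- d divides g: strip it
    have hdg : d ∣ g := Nat.dvd_of_mod_eq_zero hm
    have hg4 : 1 < g := by nlinarith [h.1, h.2]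
    obtain ⟨k, heq, hdk, hnd⟩ := stripN_spec d h.1 g 0 hg
    set m := g / d ^ k with hm_def
    have hk1 : 1 ≤ k := by
      by_contra hk0
      have hk : k = 0 := by omega
      apply hnd
      rw [hm_def, hk, pow_zero, Nat.div_one]
      exact hdg
    -- d is prime
    have hne1 : g ≠ 1 := by omega
    have hle : g.minFac ≤ d := Nat.minFac_le_of_dvd (by omega) hdg
    have hge : d ≤ g.minFac := hmin g.minFac (Nat.minFac_prime hne1) (Nat.minFac_dvd g)
    have hdmin : d = g.minFac := by omega
    have hdp : d.Prime := hdmin ▸ Nat.minFac_prime hne1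
    have hmpos : 0 < m := Nat.div_pos (Nat.le_of_dvd hg hdk) (Nat.pow_pos (by omega))
    have hgm : g = d ^ k * m := by
      rw [hm_def, Nat.mul_div_cancel' hdk]
    have hcop : (d ^ k).Coprime m := (Nat.Prime.coprime_iff_not_dvd hdp |>.mpr hnd).pow_left k
    have hcard : g.divisors.card = (k + 1) * m.divisors.card := by
      rw [hgm, Nat.Coprime.card_divisors_mul hcop]
      congr 1
      simp [Nat.divisors_prime_pow hdp]
    have hmin' : ∀ p, p.Prime → p ∣ m → d + 1 ≤ p := by
      intro p hp hpm
      have hpg : p ∣ g := hpm.trans ⟨d ^ k, by rw [hgm]; ring⟩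
      have h1 := hmin p hp hpg
      have hpd : p ≠ d := fun hpd => hnd (hpd ▸ hpm)
      omega
    have := ih (by rw [heq]; exact hmpos) (by omega) (by rw [heq]; exact hmin')
    rw [factorN, dif_pos h, dif_pos hm]
    rw [heq] at this ⊢
    simp only [Nat.zero_add] at this ⊢
    rw [this, hcard]
    push_cast
    ring
  | case2 g d count h hm ih =>
    have hmin' : ∀ p, p.Prime → p ∣ g → d + 1 ≤ p := by
      intro p hp hpg
      have h1 := hmin p hp hpg
      have : p ≠ d := fun hpd => hm (Nat.dvd_iff_mod_eq_zero.mp (hpd ▸ hpg))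
      omega
    rw [factorN, dif_pos h, dif_neg hm]
    exact ih hg (by omega) hmin'
  | case3 g d count h =>
    rw [factorN, dif_neg h]
    by_cases hg1 : g = 1
    · subst hg1
      simp
    · have hglt : g < d * d := by
        rcases not_and_or.mp h with h' | h'
        · exact absurd hd h'
        · omega
      have hp : g.Prime := by
        by_contra hnp
        have hsq := Nat.minFac_sq_le_self hg hnp
        have hdm := hmin g.minFac (Nat.minFac_prime hg1) (Nat.minFac_dvd g)
        nlinarith [hsq, hdm]
      have h1g : 1 < g := hp.one_lt
      rw [if_pos h1g]
      have : g.divisors = {1, g} := Nat.Prime.divisors hp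
      rw [this, Finset.card_insert_of_notMem (by simp; omega)]
      simp

-- the accumulated gcd
theorem foldGcd_nonneg (ls : List Int) (a : Int) (ha : 0 ≤ a) :
    0 ≤ ls.foldl (fun x l => pyGcd x l) a := by
  induction ls generalizing a with
  | nil => exact ha
  | cons l ls ih => exact ih (pyGcd a l) (Int.natCast_nonneg _)

theorem foldGcd_eq_zero (ls : List Int) (a : Int)
    (h : ls.foldl (fun x l => pyGcd x l) a = 0) : a = 0 ∧ ∀ l ∈ ls, l = 0 := by
  induction ls generalizing a with
  | nil => exact ⟨h, by simp⟩
  | cons l ls ih =>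
    obtain ⟨h0, hrest⟩ := ih (pyGcd a l) h
    have : Int.gcd a l = 0 := by simpa [pyGcd] using h0
    obtain ⟨ha, hl⟩ := Int.gcd_eq_zero_iff.mp this
    exact ⟨ha, by simpa [hl] using hrest⟩

theorem gcd_pos_of_pre (n : Int) (lines : List Int) (hpre : Pre_solve n lines) :
    0 < lines.foldl (fun a l => pyGcd a l) (n + 1) := by
  unfold Pre_solve at hpre
  cases lines with
  | nil =>
    simp only [List.foldl_nil]
    by_contra hc
    exact hpre (Or.inl ⟨rfl, by omega⟩)
  | cons l ls =>
    have hnn : 0 ≤ (l :: ls).foldl (fun a x => pyGcd a x) (n + 1) := by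
      simpa using foldGcd_nonneg ls (pyGcd (n + 1) l) (Int.natCast_nonneg _)
    rcases lt_or_eq_of_le hnn with h | h
    · exact h
    · exfalso
      obtain ⟨hz, hall⟩ := foldGcd_eq_zero (l :: ls) (n + 1) h.symm
      exact hpre (Or.inr ⟨by omega, hall⟩)

-- ===== VERDICT (by name: the statement is the Claim_ definition above) =====
theorem solve_spec : Claim_equal_solve := by
  intro n lines _hdom hpre
  unfold Spec_solve solve solve_alt
  have hpos := gcd_pos_of_pre n lines hpre
  set gg := lines.foldl (fun a l => pyGcd a l) (n + 1) with hgg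
  obtain ⟨G, hG⟩ : ∃ G : Nat, gg = (G : Int) := ⟨gg.toNat, (Int.toNat_of_nonneg hpos.le).symm⟩
  have hGpos : 0 < G := by rw [hG] at hpos; exact_mod_cast hpos
  rw [hG]
  -- A side
  have h1 : (1 : Int) = ((1 : Nat) : Int) := rfl
  have hA : solveLoopA (G : Int) 1 (-1) = loopA G 1 (-1) := by
    rw [h1]; exact solveLoopA_natCast G 1 (-1)
  rw [hA, loopA_inv G hGpos 1 le_rfl (-1), pairing G hGpos]
  -- B side
  have h2 : (2 : Int) = ((2 : Nat) : Int) := rfl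
  have hB : factorLoop (G : Int) 2 1 = (((factorN G 2 1).1 : Int), (factorN G 2 1).2) := by
    rw [h2]; exact factorLoop_natCast G 2 1
  show -1 + ((G.divisors.card : Nat) : Int) =
    (if 1 < (factorLoop (G : Int) 2 1).1 then (factorLoop (G : Int) 2 1).2 * 2
     else (factorLoop (G : Int) 2 1).2) - 1
  rw [hB]
  have hbval := factorN_spec G 2 1 hGpos (by norm_num) (fun p hp _ => hp.two_le)
  simp only []
  by_cases hone : 1 < (factorN G 2 1).1
  · rw [if_pos (by exact_mod_cast hone)]
    rw [if_pos hone] at hbval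
    omega
  · rw [if_neg (by intro hc; exact hone (by exact_mod_cast hc))]
    rw [if_neg hone] at hbval
    omega
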